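-- pv_equiv track=rewrite | github.com/PuercoPop/advent-of-code | 2015/15_2.py | mix_score
-- ===== SOURCE A (Python) =====
-- def compress(mix):
--     h=dict()
--     for ingredient in mix:
--         h[ingredient] = h.get(ingredient, 0) + 1
--     return h
--
-- def mix_score(mix, datasheet):
--     props=['flavor', 'capacity', 'texture', 'durability']
--     hist=compress(mix)
--     score=1
--     for prop in props:
--         sum=0
--         for ingredient, quantity in hist.items():
--             sum+=datasheet[ingredient][prop]*quantity
--         score*=max(0, sum)
--     return score
-- ===== SOURCE B (Python) =====
-- def mix_score(mix, datasheet):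
--     f = c = t = d = 0
--     for ingredient in mix:
--         row = datasheet[ingredient]
--         f += row['flavor']
--         c += row['capacity']
--         t += row['texture']
--         d += row['durability']
--     return max(0, f) * max(0, c) * max(0, t) * max(0, d)
-- ===== Notes on version B (the rewrite author's own statement) =====
-- stated objective: simpler
-- what changed: Replaces A's histogram dict plus per-property scans over distinct keys with a single pass over the raw mix list carrying four running property sums, multiplying the clamped sums at the end.
import Mathlib
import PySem

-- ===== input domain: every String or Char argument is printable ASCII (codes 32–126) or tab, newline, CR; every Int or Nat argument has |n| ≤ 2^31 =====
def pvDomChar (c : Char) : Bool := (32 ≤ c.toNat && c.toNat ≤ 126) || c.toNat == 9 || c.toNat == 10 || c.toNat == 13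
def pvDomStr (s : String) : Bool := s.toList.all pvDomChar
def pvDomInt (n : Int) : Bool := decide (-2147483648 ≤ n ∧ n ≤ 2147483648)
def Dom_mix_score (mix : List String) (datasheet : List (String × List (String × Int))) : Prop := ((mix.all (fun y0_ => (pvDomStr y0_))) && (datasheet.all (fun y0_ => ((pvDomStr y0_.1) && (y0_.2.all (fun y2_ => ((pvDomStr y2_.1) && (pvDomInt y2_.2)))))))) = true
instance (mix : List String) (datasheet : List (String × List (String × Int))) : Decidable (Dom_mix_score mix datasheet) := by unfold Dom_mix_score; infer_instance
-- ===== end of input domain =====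

-- B drops A's histogram dict and staged per-property scans: one pass over the raw mix carrying
-- four running property sums, then the product of the clamped sums (simpler; same cost).

-- ===== PORT A =====
-- datasheet[ingredient][prop] as first-match association lookups; exact under Pre_ (KeyError inputs excluded there)
def pvProp (datasheet : List (String × List (String × Int))) (ing prop : String) : Int :=
  (((datasheet.lookup ing).getD []).lookup prop).getD 0

-- compress(mix): h[ingredient] = h.get(ingredient, 0) + 1
def pvCompress (mix : List String) : PySem.Dict String Int :=
  mix.foldl (fun h ing => h.insert ing (h.getD ing 0 + 1)) PySem.Dict.empty

def mix_score (mix : List String) (datasheet : List (String × List (String × Int))) : Int :=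
  let props := ["flavor", "capacity", "texture", "durability"]
  let hist := pvCompress mix
  props.foldl (fun score prop =>
    score * max 0 (hist.items.foldl (fun s p => s + pvProp datasheet p.1 prop * p.2) 0)) 1

-- ===== PORT B =====
-- single pass: state is the quadruple (f, c, t, d) of running property sums
def mix_score_alt (mix : List String) (datasheet : List (String × List (String × Int))) : Int :=
  let r : Int × Int × Int × Int :=
    mix.foldl (fun s ingredient =>
      let row := (datasheet.lookup ingredient).getD []
      (s.1 + ((row.lookup "flavor").getD 0),
       s.2.1 + ((row.lookup "capacity").getD 0),
       s.2.2.1 + ((row.lookup "texture").getD 0),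
       s.2.2.2 + ((row.lookup "durability").getD 0))) (0, 0, 0, 0)
  max 0 r.1 * max 0 r.2.1 * max 0 r.2.2.1 * max 0 r.2.2.2

-- ===== PRECONDITION & SPEC =====
-- Pre_ excludes exactly the inputs where Python A raises KeyError: some mix ingredient missing
-- from datasheet, or its row missing one of the four properties (B raises there too).
def Pre_mix_score (mix : List String) (datasheet : List (String × List (String × Int))) : Prop :=
  (mix.all (fun ing =>
    match datasheet.lookup ing with
    | some row => ["flavor", "capacity", "texture", "durability"].all (fun p => (row.lookup p).isSome)
    | none => false)) = true
instance (mix : List String) (datasheet : List (String × List (String × Int))) : Decidable (Pre_mix_score mix datasheet) := by unfold Pre_mix_score; infer_instance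

def pvWitness_mix_score : List String × (List (String × List (String × Int))) :=
  (["a", "a", "b"],
   [("a", [("flavor", 2), ("capacity", 3), ("texture", 1), ("durability", 4)]),
    ("b", [("flavor", -1), ("capacity", 5), ("texture", 2), ("durability", 0)])])

def Spec_mix_score (mix : List String) (datasheet : List (String × List (String × Int))) (out : Int) : Prop := out = mix_score_alt mix datasheet
instance (mix : List String) (datasheet : List (String × List (String × Int))) (out : Int) : Decidable (Spec_mix_score mix datasheet out) := by unfold Spec_mix_score; infer_instance

-- ===== CLAIM (what is proved, stated in full; the proofs are below) =====
def Claim_equal_mix_score : Prop := ∀ (mix : List String) (datasheet : List (String × List (String × Int))), Dom_mix_score mix datasheet → Pre_mix_score mix datasheet → Spec_mix_score mix datasheet (mix_score mix datasheet)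

-- ===== LEMMAS AND PROOFS =====

-- picking the single matching entry out of a duplicate-free list
lemma pv_sum_pick (f : String → Int) (x : String) (d : List String) (hd : d.Nodup)
    (hx : x ∈ d) : (d.map (fun k => if k = x then f k else 0)).sum = f x := by
  induction d with
  | nil => cases hx
  | cons a t ih =>
    rcases List.nodup_cons.mp hd with ⟨ha, ht⟩
    rcases List.mem_cons.mp hx with h | h
    · subst h
      have hz : (t.map (fun k => if k = x then f k else 0)).sum = 0 := by
        apply List.sum_eq_zero
        intro y hy
        rcases List.mem_map.mp hy with ⟨k, hk, rfl⟩
        have : ¬ k = x := fun h => ha (h ▸ hk)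
        simp [this]
      simp [hz]
    · have hax : ¬ a = x := fun he => ha (he ▸ h)
      simp [hax, ih ht h]

-- Σ_{k ∈ d} f k · count k l = Σ_{x ∈ l} f x, for d duplicate-free and covering l
lemma pv_sum_mul_count (f : String → Int) (d : List String) (hd : d.Nodup) :
    ∀ l : List String, (∀ x ∈ l, x ∈ d) →
      (d.map (fun k => f k * (l.count k : Int))).sum = (l.map f).sum := by
  intro l
  induction l with
  | nil => intro _; simp
  | cons x t ih =>
    intro hl
    have hx : x ∈ d := hl x (by simp)
    have ht : ∀ y ∈ t, y ∈ d := fun y hy => hl y (by simp [hy])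
    have hfun : (fun k => f k * (((x :: t).count k : Int)))
        = fun k => f k * (t.count k : Int) + (if k = x then f k else 0) := by
      funext k
      rw [List.count_cons]
      by_cases h : k = x
      · simp [h]; ring
      · have h' : ¬ x = k := fun he => h he.symm
        simp [h, h']
    rw [hfun, PySem.List.sum_map_add_int, ih ht, pv_sum_pick f x d hd hx]
    simp [add_comm]

-- A's per-property inner sum over the histogram equals the plain sum over mix
lemma pv_inner_eq (mix : List String) (datasheet : List (String × List (String × Int))) (prop : String) :
    (pvCompress mix).items.foldl (fun s p => s + pvProp datasheet p.1 prop * p.2) 0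
      = (mix.map (fun ing => pvProp datasheet ing prop)).sum := by
  unfold pvCompress
  rw [PySem.Dict.foldl_insert_getD_add_one_eq_counter, PySem.Dict.items_counter,
    PySem.List.foldl_add, List.map_map]
  simp only [Function.comp_def]
  rw [pv_sum_mul_count (fun k => pvProp datasheet k prop) (PySem.Set.ofList mix)
    (PySem.Set.nodup_ofList mix) mix (fun x hx => (PySem.Set.mem_ofList mix x).mpr hx)]
  simp

-- B's quadruple-state fold computes the four plain sums componentwise
lemma pv_fold4 (mix : List String) (datasheet : List (String × List (String × Int))) :
    ∀ a b c d : Int,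
      mix.foldl (fun s ingredient =>
        let row := (datasheet.lookup ingredient).getD []
        (s.1 + ((row.lookup "flavor").getD 0),
         s.2.1 + ((row.lookup "capacity").getD 0),
         s.2.2.1 + ((row.lookup "texture").getD 0),
         s.2.2.2 + ((row.lookup "durability").getD 0))) (a, b, c, d)
      = (a + (mix.map (fun i => pvProp datasheet i "flavor")).sum,
         b + (mix.map (fun i => pvProp datasheet i "capacity")).sum,
         c + (mix.map (fun i => pvProp datasheet i "texture")).sum,
         d + (mix.map (fun i => pvProp datasheet i "durability")).sum) := by
  induction mix with
  | nil => intro a b c d; simp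
  | cons x t ih =>
    intro a b c d
    simp only [List.foldl_cons, List.map_cons, List.sum_cons, ih]
    unfold pvProp
    simp only [Prod.mk.injEq]
    refine ⟨by ring, by ring, by ring, by ring⟩

-- ===== VERDICT (by name: the statement is the Claim_ definition above) =====
theorem mix_score_spec : Claim_equal_mix_score := by
  intro mix datasheet _ _
  unfold Spec_mix_score mix_score mix_score_alt
  simp only [List.foldl]
  rw [pv_inner_eq, pv_inner_eq, pv_inner_eq, pv_inner_eq, pv_fold4]
  simp only [zero_add, one_mul]
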